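-- pv_equiv track=rewrite | github.com/pypi-data/pypi-mirror-203 | packages/yadr/yadr-0.1.2.tar.gz/yadr-0.1.2/yadr/operator.py | pool_keep_low
-- ===== SOURCE A (Python) =====
-- from collections.abc import Callable, Sequence
--
-- def pool_keep_low(pool: Sequence[int], keep: int) -> tuple[int, ...]:
--     """Keep a number of the lowest dice."""
--     pool = list(pool)
--     remove = len(pool) - keep
--     for _ in range(remove):
--         high_value = min(pool)
--         high_index = 0
--         for i, n in enumerate(pool):
--             if n > high_value:
--                 high_value = n
--                 high_index = i
--         pool.pop(high_index)
--     return tuple(pool)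
-- ===== SOURCE B (Python) =====
-- def pool_keep_low(pool, keep):
--     """Keep a number of the lowest dice."""
--     pool = list(pool)
--     remove = len(pool) - keep
--     return tuple(v for i, v in enumerate(pool)
--                  if sum(1 for j, w in enumerate(pool)
--                         if w > v or (w == v and j < i)) >= remove)
-- ===== Notes on version B (the rewrite author's own statement) =====
-- stated objective: alternative
-- what changed: B replaces A's destructive loop (repeatedly find and pop the first maximum, `remove` times) by a single direct filter: an element is kept iff at least `remove` elements beat it under the (value desc, index asc) order, so no list mutation or iterated scans over a shrinking list.
import Mathlib
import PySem

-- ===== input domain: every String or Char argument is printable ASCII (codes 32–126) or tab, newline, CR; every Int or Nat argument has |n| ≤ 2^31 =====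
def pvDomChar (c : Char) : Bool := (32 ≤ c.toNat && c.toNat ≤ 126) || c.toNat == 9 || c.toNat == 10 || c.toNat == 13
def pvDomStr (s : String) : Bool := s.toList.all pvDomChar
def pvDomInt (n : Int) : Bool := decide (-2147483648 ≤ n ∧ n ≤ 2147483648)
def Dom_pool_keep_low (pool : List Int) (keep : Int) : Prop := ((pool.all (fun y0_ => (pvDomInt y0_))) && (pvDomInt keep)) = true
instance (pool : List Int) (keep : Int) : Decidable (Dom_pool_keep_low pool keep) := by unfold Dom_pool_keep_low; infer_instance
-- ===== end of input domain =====

-- B replaces A's repeated find-and-pop-the-first-maximum loop by a single rank filter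
-- (keep an element iff at least `remove` elements beat it by (value desc, index asc)); alternative decomposition, similar cost.


-- ===== PORT A =====
def pool_keep_low (pool : List Int) (keep : Int) : List Int :=
  let remove : Int := (pool.length : Int) - keep
  (PySem.List.pyRange 0 remove 1).foldl (fun p _ =>
    match PySem.List.min? p (fun x => x) with
    | none => p   -- min([]) raises ValueError; excluded by Pre_pool_keep_low
    | some m =>
      let hvhi := (PySem.List.enumerate p).foldl
        (fun (s : Int × Int) iv => if iv.2 > s.1 then (iv.2, iv.1) else s) (m, 0)
      match PySem.List.pop? p hvhi.2 with
      | none => p   -- unreachable: hvhi.2 is a valid index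
      | some r => r.2) pool

-- ===== PORT B =====
def pool_keep_low_alt (pool : List Int) (keep : Int) : List Int :=
  let remove : Int := (pool.length : Int) - keep
  ((PySem.List.enumerate pool).filter (fun iv =>
      decide (remove ≤ (((PySem.List.enumerate pool).filter (fun jw =>
        decide (jw.2 > iv.2 ∨ (jw.2 = iv.2 ∧ jw.1 < iv.1)))).length : Int)))).map (·.2)

-- ===== PRECONDITION & SPEC =====
-- Pre_ excludes exactly keep < 0: there A's min(pool) eventually runs on an empty list and raises ValueError
-- (B would return the empty list there).
def Pre_pool_keep_low (pool : List Int) (keep : Int) : Prop := 0 ≤ keep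
instance (pool : List Int) (keep : Int) : Decidable (Pre_pool_keep_low pool keep) := by unfold Pre_pool_keep_low; infer_instance
def pvWitness_pool_keep_low : List Int × Int := ([3, 1, 4, 1, 5], 2)

def Spec_pool_keep_low (pool : List Int) (keep : Int) (out : List Int) : Prop := out = pool_keep_low_alt pool keep
instance (pool : List Int) (keep : Int) (out : List Int) : Decidable (Spec_pool_keep_low pool keep out) := by unfold Spec_pool_keep_low; infer_instance

-- ===== CLAIM (what is proved, stated in full; the proofs are below) =====
def Claim_equal_pool_keep_low : Prop := ∀ (pool : List Int) (keep : Int), Dom_pool_keep_low pool keep → Pre_pool_keep_low pool keep → Spec_pool_keep_low pool keep (pool_keep_low pool keep)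

-- ===== LEMMAS AND PROOFS =====

-- one pass of A's outer loop, as a named function
def pvStep (p : List Int) : List Int :=
  match PySem.List.min? p (fun x => x) with
  | none => p
  | some m =>
    let hvhi := (PySem.List.enumerate p).foldl
      (fun (s : Int × Int) iv => if iv.2 > s.1 then (iv.2, iv.1) else s) (m, 0)
    match PySem.List.pop? p hvhi.2 with
    | none => p
    | some r => r.2

def pvRank (p : List Int) (i : Nat) : Nat :=
  ((List.range p.length).filter (fun j =>
    decide (p.getD j 0 > p.getD i 0 ∨ (p.getD j 0 = p.getD i 0 ∧ j < i)))).length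
def pvKeep (p : List Int) (r : Nat) : List Int :=
  ((List.range p.length).filter (fun i => decide (r ≤ pvRank p i))).map (fun i => p.getD i 0)

theorem pvGetD_eraseIdx (p : List Int) (I j : Nat) (hI : I < p.length) (hj : j < p.length - 1) :
    (p.eraseIdx I).getD j 0 = p.getD (if j < I then j else j + 1) 0 := by
  have hj' : j < (p.eraseIdx I).length := by rw [List.length_eraseIdx_of_lt hI]; omega
  rw [List.getD_eq_getElem _ _ hj', List.getElem_eraseIdx hj']
  split
  · rw [List.getD_eq_getElem _ _ (by omega)]
  · rw [List.getD_eq_getElem _ _ (by omega)]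

-- decomposition of range p.length around I
theorem pvRange_split (n I : Nat) (hI : I < n) :
    List.range n = List.range I ++ I :: (List.range (n - 1 - I)).map (fun k => I + 1 + k) := by
  have h : n = (I + 1) + (n - 1 - I) := by omega
  rw [show List.range n = List.range ((I+1) + (n-1-I)) from by rw [← h], List.range_add,
      List.range_succ]
  simp

theorem pvRangeL_split (n I : Nat) (hI : I < n) :
    (List.range (n - 1)).map (fun j => if j < I then j else j + 1)
      = List.range I ++ (List.range (n - 1 - I)).map (fun k => I + 1 + k) := by
  have h : n - 1 = I + (n - 1 - I) := by omega
  rw [show List.range (n-1) = List.range (I + (n-1-I)) from by rw [← h], List.range_add]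
  rw [List.map_append, List.map_map]
  congr 1
  · rw [List.map_congr_left (g := id) ?_, List.map_id]
    intro j hj
    simp only [List.mem_range] at hj
    simp [if_pos hj]
  · apply List.map_congr_left
    intro k _
    simp only [Function.comp_apply]
    rw [if_neg (by omega)]
    omega

theorem pvPerm (n I : Nat) (hI : I < n) :
    (List.range n).Perm (I :: (List.range (n - 1)).map (fun j => if j < I then j else j + 1)) := by
  rw [pvRange_split n I hI, pvRangeL_split n I hI]
  exact List.perm_middle

theorem pvCount_split (n I : Nat) (hI : I < n) (pred : Nat → Bool) (hpI : pred I = true) :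
    List.countP pred (List.range n)
      = 1 + List.countP (fun j => pred (if j < I then j else j + 1)) (List.range (n - 1)) := by
  rw [(pvPerm n I hI).countP_eq, List.countP_cons, List.countP_map, hpI]
  simp [Function.comp_def]
  omega

theorem pvRank_eq_countP (p : List Int) (i : Nat) :
    pvRank p i = List.countP (fun j =>
      decide (p.getD j 0 > p.getD i 0 ∨ (p.getD j 0 = p.getD i 0 ∧ j < i))) (List.range p.length) := by
  rw [pvRank, List.countP_eq_length_filter]

theorem pvRank_I (p : List Int) (I : Nat) (hI : I < p.length)
    (hmax : ∀ j < p.length, p.getD j 0 ≤ p.getD I 0)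
    (hfirst : ∀ j < I, p.getD j 0 < p.getD I 0) :
    pvRank p I = 0 := by
  unfold pvRank
  rw [List.filter_eq_nil_iff.mpr, List.length_nil]
  intro j hj
  simp only [List.mem_range] at hj
  have h1 := hmax j hj
  simp only [decide_eq_true_eq, not_or, not_and, not_lt]
  constructor
  · omega
  · intro hEq
    by_contra hjI
    have := hfirst j (by omega)
    omega

theorem pvPred_at_I (p : List Int) (I : Nat) (hI : I < p.length)
    (hmax : ∀ j < p.length, p.getD j 0 ≤ p.getD I 0)
    (hfirst : ∀ j < I, p.getD j 0 < p.getD I 0)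
    (i' : Nat) (hi' : i' < p.length) (hne : i' ≠ I) :
    (decide (p.getD I 0 > p.getD i' 0 ∨ (p.getD I 0 = p.getD i' 0 ∧ I < i'))) = true := by
  have h1 := hmax i' hi'
  rw [decide_eq_true_eq]
  by_cases hlt : p.getD i' 0 < p.getD I 0
  · left; exact hlt
  · right
    refine ⟨by omega, ?_⟩
    by_contra hle
    have := hfirst i' (by omega)
    omega

theorem pvRank_erase (p : List Int) (I : Nat) (hI : I < p.length)
    (hmax : ∀ j < p.length, p.getD j 0 ≤ p.getD I 0)
    (hfirst : ∀ j < I, p.getD j 0 < p.getD I 0)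
    (i : Nat) (hi : i < p.length - 1) :
    pvRank p (if i < I then i else i + 1) = 1 + pvRank (p.eraseIdx I) i := by
  set i' := (if i < I then i else i + 1) with hi'def
  have hi'lt : i' < p.length := by rw [hi'def]; split <;> omega
  have hi'ne : i' ≠ I := by rw [hi'def]; split <;> omega
  rw [pvRank_eq_countP, pvRank_eq_countP,
      pvCount_split p.length I hI _ (pvPred_at_I p I hI hmax hfirst i' hi'lt hi'ne)]
  congr 1
  rw [List.length_eraseIdx_of_lt hI]
  apply List.countP_congr
  intro j hj
  simp only [List.mem_range] at hj
  rw [pvGetD_eraseIdx p I j hI hj, pvGetD_eraseIdx p I i hI hi, ← hi'def]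
  have : ((if j < I then j else j + 1) < i') ↔ (j < i) := by
    rw [hi'def]; split <;> split <;> omega
  simp only [decide_eq_true_eq]
  rw [this]

theorem pvKeep_zero (p : List Int) : pvKeep p 0 = p := by
  unfold pvKeep
  rw [List.filter_eq_self.mpr (by intro a _; simp)]
  apply List.ext_getElem
  · simp
  · intro i h1 h2
    simp [List.getElem?_eq_getElem h2]

theorem pvKeep_erase (p : List Int) (I : Nat) (hI : I < p.length)
    (hmax : ∀ j < p.length, p.getD j 0 ≤ p.getD I 0)
    (hfirst : ∀ j < I, p.getD j 0 < p.getD I 0) (r : Nat) :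
    pvKeep p (r + 1) = pvKeep (p.eraseIdx I) r := by
  unfold pvKeep
  rw [List.length_eraseIdx_of_lt hI]
  obtain ⟨L', hL'⟩ : ∃ L', p.length - 1 - I = L' := ⟨_, rfl⟩
  rw [pvRange_split p.length I hI, hL']
  rw [show List.range (p.length - 1)
        = List.range I ++ (List.range L').map (fun k => I + k) from by
      rw [show p.length - 1 = I + L' from by omega, List.range_add]]
  rw [List.filter_append, List.filter_append, List.filter_cons]
  rw [if_neg (by simp [pvRank_I p I hI hmax hfirst])]
  rw [List.filter_map, List.filter_map, List.map_append, List.map_append, List.map_map, List.map_map]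
  congr 1
  · -- first chunk: indices below I
    rw [List.filter_congr (q := fun j => decide (r ≤ pvRank (p.eraseIdx I) j)) ?_]
    · apply List.map_congr_left
      intro j hj
      rw [List.mem_filter, List.mem_range] at hj
      rw [pvGetD_eraseIdx p I j hI (by omega), if_pos hj.1]
    · intro j hj
      rw [List.mem_range] at hj
      have := pvRank_erase p I hI hmax hfirst j (by omega)
      rw [if_pos hj] at this
      rw [decide_eq_decide]
      omega
  · -- second chunk: indices above I
    rw [List.filter_congr
        (q := (fun j => decide (r ≤ pvRank (p.eraseIdx I) j)) ∘ (fun k => I + k)) ?_]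
    · apply List.map_congr_left
      intro k hk
      rw [List.mem_filter, List.mem_range] at hk
      simp only [Function.comp_apply]
      rw [pvGetD_eraseIdx p I (I + k) hI (by omega), if_neg (by omega)]
      congr 1
      omega
    · intro k hk
      rw [List.mem_range] at hk
      simp only [Function.comp_apply]
      have := pvRank_erase p I hI hmax hfirst (I + k) (by omega)
      rw [if_neg (by omega)] at this
      rw [decide_eq_decide]
      rw [show I + 1 + k = I + k + 1 from by omega]
      omega

theorem pvFoldInv (l : List (Int × Int)) (hl : l.Pairwise (fun a b => a.1 < b.1)) (s : Int × Int) :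
    s.1 ≤ (l.foldl (fun s iv => if iv.2 > s.1 then (iv.2, iv.1) else s) s).1 ∧
    (∀ q ∈ l, q.2 ≤ (l.foldl (fun s iv => if iv.2 > s.1 then (iv.2, iv.1) else s) s).1) ∧
    (((l.foldl (fun s iv => if iv.2 > s.1 then (iv.2, iv.1) else s) s) = s ∧ ∀ q ∈ l, q.2 ≤ s.1) ∨
      (((l.foldl (fun s iv => if iv.2 > s.1 then (iv.2, iv.1) else s) s).2,
        (l.foldl (fun s iv => if iv.2 > s.1 then (iv.2, iv.1) else s) s).1) ∈ l ∧
       s.1 < (l.foldl (fun s iv => if iv.2 > s.1 then (iv.2, iv.1) else s) s).1 ∧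
       ∀ q ∈ l, q.1 < (l.foldl (fun s iv => if iv.2 > s.1 then (iv.2, iv.1) else s) s).2 →
         q.2 < (l.foldl (fun s iv => if iv.2 > s.1 then (iv.2, iv.1) else s) s).1)) := by
  induction l generalizing s with
  | nil => simp
  | cons a l ih =>
    rw [List.pairwise_cons] at hl
    obtain ⟨ha, hl'⟩ := hl
    simp only [List.foldl_cons]
    by_cases h : a.2 > s.1
    · simp only [if_pos h]
      obtain ⟨h1, h2, h3⟩ := ih hl' (a.2, a.1)
      simp only at h1
      refine ⟨by omega, ?_, .inr ?_⟩
      · intro q hq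
        rcases List.mem_cons.mp hq with rfl | hq'
        · exact h1
        · exact h2 q hq'
      · rcases h3 with ⟨heq, hall⟩ | ⟨hmem, hgt, hfirst⟩
        · refine ⟨by rw [heq]; exact .head _, by rw [heq]; simpa using h, ?_⟩
          intro q hq hq1
          rcases List.mem_cons.mp hq with rfl | hq'
          · rw [heq] at hq1; simp only at hq1; omega
          · rw [heq] at hq1
            exact absurd hq1 (by have := ha q hq'; simp only at this ⊢; omega)
        · simp only at hgt
          refine ⟨.tail _ hmem, by omega, ?_⟩
          intro q hq hq1
          rcases List.mem_cons.mp hq with rfl | hq'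
          · omega
          · exact hfirst q hq' hq1
    · simp only [if_neg h]
      obtain ⟨h1, h2, h3⟩ := ih hl' s
      rw [not_lt] at h
      refine ⟨h1, ?_, ?_⟩
      · intro q hq
        rcases List.mem_cons.mp hq with rfl | hq'
        · exact le_trans h h1
        · exact h2 q hq'
      · rcases h3 with ⟨heq, hall⟩ | ⟨hmem, hgt, hfirst⟩
        · refine .inl ⟨heq, ?_⟩
          intro q hq
          rcases List.mem_cons.mp hq with rfl | hq'
          · exact h
          · exact hall q hq'
        · refine .inr ⟨.tail _ hmem, hgt, ?_⟩
          intro q hq hq1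
          rcases List.mem_cons.mp hq with rfl | hq'
          · omega
          · exact hfirst q hq' hq1


theorem pvStep_char (p : List Int) (hp : p ≠ []) :
    ∃ I : Nat, I < p.length ∧ pvStep p = p.eraseIdx I ∧
      (∀ j < p.length, p.getD j 0 ≤ p.getD I 0) ∧
      (∀ j < I, p.getD j 0 < p.getD I 0) := by
  have hlen : 0 < p.length := List.length_pos_of_ne_nil hp
  obtain ⟨m, hm⟩ : ∃ m, PySem.List.min? p (fun x => x) = some m := by
    cases hmm : PySem.List.min? p (fun x => x) with
    | none => exact absurd ((PySem.List.min?_eq_none_iff _ _).mp hmm) hp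
    | some m => exact ⟨m, rfl⟩
  have hmin : ∀ y ∈ p, m ≤ y := fun y hy => PySem.List.min?_isMin hm y hy
  obtain ⟨h1, h2, h3⟩ := pvFoldInv (PySem.List.enumerate p 0) (PySem.List.pairwise_lt_enumerate p 0) (m, 0)
  unfold pvStep
  rw [hm]
  simp only
  set t := (PySem.List.enumerate p 0).foldl (fun s iv => if iv.2 > s.1 then (iv.2, iv.1) else s) (m, (0:Int)) with ht
  rcases h3 with ⟨heq, hall⟩ | ⟨hmem, _, hfirst⟩
  · refine ⟨0, hlen, ?_, ?_, by omega⟩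
    · have h0 : t.2 = ((0:Nat) : Int) := by rw [heq]; simp
      rw [h0, PySem.List.pop?_natCast _ _ hlen]
    · intro j hj
      have hj2 : ((j:Int), p[j]) ∈ PySem.List.enumerate p 0 := by
        rw [PySem.List.mem_enumerate_iff]; exact ⟨j, hj, by simp⟩
      have hle := hall _ hj2
      simp only at hle
      have hge := hmin p[0] (by simp)
      simp only [List.getD_eq_getElem _ _ hj, List.getD_eq_getElem _ _ hlen]
      omega
  · rw [PySem.List.mem_enumerate_iff] at hmem
    obtain ⟨k, hk, hkeq⟩ := hmem
    rw [Prod.ext_iff] at hkeq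
    have hk2 : t.2 = (k : Int) := by simpa using hkeq.1
    have hk1 : t.1 = p[k] := hkeq.2
    refine ⟨k, hk, ?_, ?_, ?_⟩
    · rw [hk2, PySem.List.pop?_natCast _ _ hk]
    · intro j hj
      have hj2 : ((j:Int), p[j]) ∈ PySem.List.enumerate p 0 := by
        rw [PySem.List.mem_enumerate_iff]; exact ⟨j, hj, by simp⟩
      have := h2 _ hj2
      simp only [List.getD_eq_getElem _ _ hj, List.getD_eq_getElem _ _ hk]
      omega
    · intro j hj
      have hjlen : j < p.length := lt_trans hj hk
      have hj2 : ((j:Int), p[j]) ∈ PySem.List.enumerate p 0 := by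
        rw [PySem.List.mem_enumerate_iff]; exact ⟨j, hjlen, by simp⟩
      have := hfirst _ hj2 (by rw [hk2]; show (j:Int) < (k:Int); exact_mod_cast hj)
      simp only [List.getD_eq_getElem _ _ hjlen, List.getD_eq_getElem _ _ hk]
      omega


theorem pvFoldConst {α β : Type} (f : α → α) (l : List β) (a : α) :
    l.foldl (fun x _ => f x) a = f^[l.length] a := by
  induction l generalizing a with
  | nil => rfl
  | cons b t ih => simp [List.foldl_cons, ih, Function.iterate_succ_apply]

theorem pvA_iterate (pool : List Int) (keep : Int) :
    pool_keep_low pool keep = pvStep^[((pool.length : Int) - keep).toNat] pool := by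
  unfold pool_keep_low
  dsimp only
  rw [show (fun (p : List Int) (_ : Int) =>
    match PySem.List.min? p (fun x => x) with
    | none => p
    | some m =>
      let hvhi := (PySem.List.enumerate p).foldl
        (fun (s : Int × Int) iv => if iv.2 > s.1 then (iv.2, iv.1) else s) (m, 0)
      match PySem.List.pop? p hvhi.2 with
      | none => p
      | some r => r.2) = (fun p _ => pvStep p) from rfl]
  rw [pvFoldConst, PySem.List.length_pyRange_one]
  norm_num

theorem enumEq (p : List Int) : PySem.List.enumerate p 0 = (List.range p.length).map (fun (i : Nat) => ((i:Int), p.getD i 0)) := by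
  simp [PySem.List.enumerate_eq_map_pyRange (d := (0:Int)), PySem.List.pyRange_one, List.map_map]

theorem pvB_keep (pool : List Int) (keep : Int) :
    pool_keep_low_alt pool keep = pvKeep pool ((pool.length : Int) - keep).toNat := by
  unfold pool_keep_low_alt pvKeep
  dsimp only
  rw [enumEq, List.filter_map, List.map_map]
  dsimp only [Function.comp_def]
  apply congrArg
  apply List.filter_congr
  intro i hi
  simp only [List.mem_range] at hi
  simp only [decide_eq_decide, Int.toNat_le]
  have : ((List.range pool.length).map (fun (j : Nat) => ((j:Int), pool.getD j 0))).filter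
        (fun jw => decide (jw.2 > pool.getD i 0 ∨ (jw.2 = pool.getD i 0 ∧ jw.1 < (i:Int))))
      = ((List.range pool.length).filter (fun j =>
        decide (pool.getD j 0 > pool.getD i 0 ∨ (pool.getD j 0 = pool.getD i 0 ∧ j < i)))).map
          (fun (j : Nat) => ((j:Int), pool.getD j 0)) := by
    rw [List.filter_map]
    apply congrArg
    apply List.filter_congr
    intro j hj
    simp
  rw [this, List.length_map]
  rfl

theorem pvMain (r : Nat) (p : List Int) (hr : r ≤ p.length) :
    pvStep^[r] p = pvKeep p r := by
  induction r generalizing p with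
  | zero => simp [pvKeep_zero]
  | succ r ih =>
    have hp : p ≠ [] := by intro h; subst h; simp at hr
    obtain ⟨I, hI, hstep, hmax, hfirst⟩ := pvStep_char p hp
    rw [Function.iterate_succ_apply, hstep, ih _ (by rw [List.length_eraseIdx_of_lt hI]; omega),
        ← pvKeep_erase p I hI hmax hfirst r]

-- ===== VERDICT (by name: the statement is the Claim_ definition above) =====
theorem pool_keep_low_spec : Claim_equal_pool_keep_low := by
  intro pool keep _ hpre
  unfold Spec_pool_keep_low
  rw [pvA_iterate, pvB_keep, pvMain]
  unfold Pre_pool_keep_low at hpre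
  omega
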